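-- pv_equiv track=rewrite | github.com/alvartgil91/barrioscout | scripts/fix_voronoi_overlaps.py | _find_polygon
-- ===== SOURCE A (Python) =====
-- def _find_polygon(name: str, polys: dict):
--     key = name.lower()
--     if key in polys:
--         return polys[key]
--     for k, v in polys.items():
--         if key in k or k in key:
--             return v
--     return None
-- ===== SOURCE B (Python) =====
-- def _find_polygon(name: str, polys: dict):
--     key = name.lower()
--     found = False
--     fallback = None
--     for k, v in polys.items():
--         if k == key:
--             return v
--         if not found and (key in k or k in key):
--             found = True
--             fallback = v
--     return fallback
-- ===== Notes on version B (the rewrite author's own statement) =====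
-- stated objective: simpler
-- what changed: Replaced the two-phase dict-membership-then-fallback-scan with a single pass that returns on the first exact key match and records the first substring match in a flagged accumulator.
import Mathlib
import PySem

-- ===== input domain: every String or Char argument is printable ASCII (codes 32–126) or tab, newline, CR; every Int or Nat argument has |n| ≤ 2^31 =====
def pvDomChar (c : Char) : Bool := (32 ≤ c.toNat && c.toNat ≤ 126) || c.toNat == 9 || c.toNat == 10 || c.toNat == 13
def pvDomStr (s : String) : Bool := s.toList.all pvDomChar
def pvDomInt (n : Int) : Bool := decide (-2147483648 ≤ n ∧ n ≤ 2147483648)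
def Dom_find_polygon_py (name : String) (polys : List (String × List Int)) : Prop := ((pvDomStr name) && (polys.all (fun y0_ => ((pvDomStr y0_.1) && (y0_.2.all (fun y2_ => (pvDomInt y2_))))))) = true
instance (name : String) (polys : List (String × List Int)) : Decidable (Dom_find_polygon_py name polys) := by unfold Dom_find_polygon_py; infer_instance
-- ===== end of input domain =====

-- B merges A's exact-lookup-then-fallback-scan into a single pass with a found flag; objective: simpler.


-- ===== PORT A =====
-- 'key in polys' followed by 'polys[key]' = first-match association-list lookup
def pvGetA (key : String) : List (String × List Int) → Option (List Int)
  | [] => none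
  | (k, v) :: rest => if k == key then some v else pvGetA key rest

-- A's fallback loop: first entry with 'key in k or k in key'
def pvScanA (key : String) : List (String × List Int) → Option (List Int)
  | [] => none
  | (k, v) :: rest =>
      if PySem.Str.isIn key k || PySem.Str.isIn k key then some v else pvScanA key rest

def find_polygon_py (name : String) (polys : List (String × List Int)) : Option (List Int) :=
  let key := PySem.Str.lower name
  match pvGetA key polys with
  | some v => some v
  | none => pvScanA key polys

-- ===== PORT B =====
-- single pass: return on exact match, record first substring match in (found, fallback)
def pvAltGo (key : String) (found : Bool) (fallback : Option (List Int)) :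
    List (String × List Int) → Option (List Int)
  | [] => fallback
  | (k, v) :: rest =>
      if k == key then some v
      else if !found && (PySem.Str.isIn key k || PySem.Str.isIn k key) then
        pvAltGo key true (some v) rest
      else pvAltGo key found fallback rest

def find_polygon_py_alt (name : String) (polys : List (String × List Int)) : Option (List Int) :=
  pvAltGo (PySem.Str.lower name) false none polys

-- ===== PRECONDITION & SPEC =====
def Spec_find_polygon_py (name : String) (polys : List (String × List Int)) (out : Option (List Int)) : Prop := out = find_polygon_py_alt name polys
instance (name : String) (polys : List (String × List Int)) (out : Option (List Int)) : Decidable (Spec_find_polygon_py name polys out) := by unfold Spec_find_polygon_py; infer_instance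

-- ===== CLAIM (what is proved, stated in full; the proofs are below) =====
def Claim_equal_find_polygon_py : Prop := ∀ (name : String) (polys : List (String × List Int)), Dom_find_polygon_py name polys → Spec_find_polygon_py name polys (find_polygon_py name polys)

-- ===== LEMMAS AND PROOFS =====
-- loop invariant for B's single pass: found=false means no fallback recorded yet
lemma pvAltGo_eq (key : String) :
    ∀ (polys : List (String × List Int)) (found : Bool) (fb : Option (List Int)),
      (found = false → fb = none) →
      pvAltGo key found fb polys =
        match pvGetA key polys with
        | some v => some v
        | none => if found then fb else pvScanA key polys := by
  intro polys
  induction polys with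
  | nil =>
      intro found fb h
      cases found with
      | false => simp [pvAltGo, pvGetA, pvScanA, h rfl]
      | true => simp [pvAltGo, pvGetA]
  | cons hd rest ih =>
      intro found fb h
      obtain ⟨k, v⟩ := hd
      by_cases hk : (k == key) = true
      · simp [pvAltGo, pvGetA, hk]
      · simp only [pvAltGo, pvGetA, pvScanA, hk, Bool.false_eq_true, if_false]
        by_cases hs : (PySem.Str.isIn key k || PySem.Str.isIn k key) = true
        · cases found with
          | false =>
              simp only [Bool.not_false, Bool.true_and, hs, if_true]
              rw [ih true (some v) (by simp)]
              cases pvGetA key rest <;> simp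
          | true =>
              simp only [Bool.not_true, Bool.false_and, Bool.false_eq_true, if_false]
              rw [ih true fb (by simp)]
              cases pvGetA key rest <;> simp
        · cases found with
          | false =>
              simp only [Bool.not_false, Bool.true_and, hs, Bool.false_eq_true, if_false]
              rw [ih false fb h]
              cases pvGetA key rest <;> simp
          | true =>
              simp only [Bool.not_true, Bool.false_and, Bool.false_eq_true, if_false]
              rw [ih true fb (by simp)]
              cases pvGetA key rest <;> simp

-- ===== VERDICT (by name: the statement is the Claim_ definition above) =====
theorem find_polygon_py_spec : Claim_equal_find_polygon_py := by
  intro name polys _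
  unfold Spec_find_polygon_py find_polygon_py find_polygon_py_alt
  rw [pvAltGo_eq (PySem.Str.lower name) polys false none (fun _ => rfl)]
  cases h : pvGetA (PySem.Str.lower name) polys <;> simp [h]
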